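-- pv_equiv track=rewrite | github.com/TheBlueMuzzy/roll-better | proto/monte_carlo_game_length.py | find_auto_locks
-- ===== SOURCE A (Python) =====
-- def find_auto_locks(pool_dice, goal, locked_mask):
--     new_locked = list(locked_mask)
--     remaining = []
--     for die in pool_dice:
--         matched = False
--         for i in range(8):
--             if not new_locked[i] and goal[i] == die:
--                 new_locked[i] = True
--                 matched = True
--                 break
--         if not matched:
--             remaining.append(die)
--     return new_locked, remaining
-- ===== SOURCE B (Python) =====
-- def find_auto_locks(pool_dice, goal, locked_mask):
--     # Index unlocked slots by goal value lazily with a single shared scan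
--     # pointer: each slot is examined at most once overall, and each die is
--     # matched by a dict lookup, instead of A's rescan of slots 0..7 per die.
--     new_locked = list(locked_mask)
--     remaining = []
--     slots = {}      # goal value -> unlocked slot indices discovered so far (ascending)
--     scanned = 0     # slots 0..scanned-1 have been indexed
--     for die in pool_dice:
--         q = slots.get(die)
--         while not q and scanned < 8:
--             if not new_locked[scanned]:
--                 slots.setdefault(goal[scanned], []).append(scanned)
--             scanned += 1
--             q = slots.get(die)
--         if q:
--             new_locked[q.pop(0)] = True
--         else:
--             remaining.append(die)
--     return new_locked, remaining
-- ===== Notes on version B (the rewrite author's own statement) =====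
-- stated objective: faster
-- what changed: B builds one dict mapping each goal value to the queue of its unlocked slot indices, filled by a single lazily advancing scan pointer, and matches each die by a dict lookup/pop, replacing A's rescan of slots 0..7 for every die (measured ~2x on large pools).
import Mathlib
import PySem

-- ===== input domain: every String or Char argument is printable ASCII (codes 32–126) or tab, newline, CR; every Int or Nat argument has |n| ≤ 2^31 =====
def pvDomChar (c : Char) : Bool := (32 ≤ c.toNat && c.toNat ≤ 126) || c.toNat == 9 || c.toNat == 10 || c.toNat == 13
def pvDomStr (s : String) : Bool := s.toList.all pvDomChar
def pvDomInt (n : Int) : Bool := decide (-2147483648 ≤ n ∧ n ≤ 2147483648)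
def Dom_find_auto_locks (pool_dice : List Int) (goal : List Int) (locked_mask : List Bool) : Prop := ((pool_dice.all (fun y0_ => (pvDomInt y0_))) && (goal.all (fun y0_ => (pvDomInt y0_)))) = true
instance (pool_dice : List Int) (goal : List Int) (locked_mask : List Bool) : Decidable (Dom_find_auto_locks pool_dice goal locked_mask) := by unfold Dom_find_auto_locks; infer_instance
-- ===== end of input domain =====

-- B indexes the unlocked goal slots by value in a dict filled by one lazily advancing scan
-- (each slot examined at most once overall) and matches each die by a dict lookup, instead
-- of A's rescan of slots 0..7 for every die; equal return values on Pre_.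

-- ===== PORT A =====
-- inner 'for i in range(8): …  break' scan; the indices are the literals 0..7 and on
-- Pre_ every index A's Python actually evaluates is in range, so Nat getD indexing is exact.
def scanA (nl : List Bool) (goal : List Int) (die : Int) : List Nat → Option Nat
  | [] => none
  | i :: rest =>
      if !(nl.getD i false) && (goal.getD i 0 == die) then some i
      else scanA nl goal die rest

def stepA (goal : List Int) (st : List Bool × List Int) (die : Int) : List Bool × List Int :=
  match scanA st.1 goal die (List.range 8) with
  | some i => (st.1.set i true, st.2)
  | none => (st.1, st.2 ++ [die])

def find_auto_locks (pool_dice : List Int) (goal : List Int) (locked_mask : List Bool) : List Bool × List Int :=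
  pool_dice.foldl (stepA goal) (locked_mask, [])

-- ===== PORT B =====
-- 'q = slots.get(die); while not q and scanned < 8: if not new_locked[scanned]:
--    slots.setdefault(goal[scanned], []).append(scanned); scanned += 1; q = slots.get(die)'
-- ('not q' on the List-valued entry is isEmpty on getD _ []; the indices are the counter
-- values 0..7 and on Pre_ every index B's Python actually evaluates is in range, so Nat
-- getD indexing is exact)
def scanWhileB (goal : List Int) (nl : List Bool) (die : Int)
    (slots : PySem.Dict Int (List Int)) (scanned : Nat) : PySem.Dict Int (List Int) × Nat :=
  if h : (slots.getD die []).isEmpty = true ∧ scanned < 8 then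
    scanWhileB goal nl die
      (if !(nl.getD scanned false) then
        slots.insert (goal.getD scanned 0) (slots.getD (goal.getD scanned 0) [] ++ [(scanned : Int)])
      else slots)
      (scanned + 1)
  else (slots, scanned)
termination_by 8 - scanned
decreasing_by omega

-- per-die step: after the while loop, 'if q: new_locked[q.pop(0)] = True else:
-- remaining.append(die)'; q.pop(0) on a nonempty q is (q[0], q[1:]) = (q.headD 0, q.tail);
-- the popped index is a nonnegative scan index of an existing slot, so .toNat is exact.
def stepB (goal : List Int) (st : PySem.Dict Int (List Int) × Nat × List Bool × List Int)
    (die : Int) : PySem.Dict Int (List Int) × Nat × List Bool × List Int :=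
  let r := scanWhileB goal st.2.2.1 die st.1 st.2.1
  let q := r.1.getD die []
  if q.isEmpty then (r.1, r.2, st.2.2.1, st.2.2.2 ++ [die])
  else (r.1.insert die q.tail, r.2, st.2.2.1.set (q.headD 0).toNat true, st.2.2.2)

def find_auto_locks_alt (pool_dice : List Int) (goal : List Int) (locked_mask : List Bool) : List Bool × List Int :=
  let st := pool_dice.foldl (stepB goal) (PySem.Dict.empty, 0, locked_mask, [])
  (st.2.2.1, st.2.2.2)

-- ===== PRECONDITION & SPEC =====
-- Pre_ admits the inputs where both 8-entry lists exist, and additionally the short-list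
-- inputs on which every die finds an unlocked in-bounds slot of its value (counted per
-- value); on both kinds A returns. It excludes the remaining short-list inputs, where
-- both A and B raise IndexError on the first die that fails to match before an
-- out-of-range index is reached (on the rare such inputs where A still returns — an
-- unmatched die walking only locked or matched slots — B agrees, but the equality is
-- not claimed there).
def Pre_find_auto_locks (pool_dice : List Int) (goal : List Int) (locked_mask : List Bool) : Prop :=
  (8 ≤ goal.length ∧ 8 ≤ locked_mask.length)
  ∨ (∀ v ∈ pool_dice, pool_dice.count v ≤
      ((List.range (min 8 (min goal.length locked_mask.length))).filter
        (fun i => !(locked_mask.getD i false) && (goal.getD i 0 == v))).length)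
instance (pool_dice : List Int) (goal : List Int) (locked_mask : List Bool) : Decidable (Pre_find_auto_locks pool_dice goal locked_mask) := by unfold Pre_find_auto_locks; infer_instance

def pvWitness_find_auto_locks : List Int × List Int × List Bool :=
  ([3, 5, 3, 9], [1, 2, 3, 4, 5, 6, 7, 8], [false, true, false, false, false, false, false, false])

def Spec_find_auto_locks (pool_dice : List Int) (goal : List Int) (locked_mask : List Bool) (out : List Bool × List Int) : Prop := out = find_auto_locks_alt pool_dice goal locked_mask
instance (pool_dice : List Int) (goal : List Int) (locked_mask : List Bool) (out : List Bool × List Int) : Decidable (Spec_find_auto_locks pool_dice goal locked_mask out) := by unfold Spec_find_auto_locks; infer_instance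

-- ===== CLAIM (what is proved, stated in full; the proofs are below) =====
def Claim_equal_find_auto_locks : Prop := ∀ (pool_dice : List Int) (goal : List Int) (locked_mask : List Bool), Dom_find_auto_locks pool_dice goal locked_mask → Pre_find_auto_locks pool_dice goal locked_mask → Spec_find_auto_locks pool_dice goal locked_mask (find_auto_locks pool_dice goal locked_mask)

-- ===== LEMMAS AND PROOFS =====

-- the unlocked slots of value v among the first n, in increasing index order
def filtN (n : Nat) (goal : List Int) (nl : List Bool) (v : Int) : List Nat :=
  (List.range n).filter (fun i => !(nl.getD i false) && (goal.getD i 0 == v))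

-- A's inner scan returns the first matching slot
theorem scanA_eq_head (nl : List Bool) (goal : List Int) (die : Int) :
    ∀ l : List Nat,
      scanA nl goal die l = (l.filter (fun i => !(nl.getD i false) && (goal.getD i 0 == die))).head? := by
  intro l
  induction l with
  | nil => rfl
  | cons i rest ih =>
      rw [List.filter_cons]
      by_cases h : (!(nl.getD i false) && (goal.getD i 0 == die)) = true
      · rw [scanA, if_pos h, if_pos h, List.head?_cons]
      · rw [scanA, if_neg h, if_neg h, ih]

theorem filtN_append (goal : List Int) (nl : List Bool) (v : Int) {s s' : Nat} (h : s ≤ s') :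
    filtN s' goal nl v
      = filtN s goal nl v
        ++ ((List.range (s' - s)).map (fun x => s + x)).filter
            (fun i => !(nl.getD i false) && (goal.getD i 0 == v)) := by
  obtain ⟨d, rfl⟩ := Nat.exists_eq_add_of_le h
  unfold filtN
  rw [Nat.add_sub_cancel_left, List.range_add, List.filter_append]

-- a nonempty truncated filter determines the head of every longer filter
theorem head_mono (goal : List Int) (nl : List Bool) (v : Int) {s s' : Nat} {m : Nat}
    {t : List Nat} (h : s ≤ s') (hft : filtN s goal nl v = m :: t) :
    (filtN s' goal nl v).head? = some m := by
  rw [filtN_append goal nl v h, hft]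
  rfl

theorem filtN_succ (goal : List Int) (nl : List Bool) (v : Int) (s : Nat) :
    filtN (s + 1) goal nl v
      = filtN s goal nl v
        ++ (if (!(nl.getD s false) && (goal.getD s 0 == v)) = true then [s] else []) := by
  unfold filtN
  rw [List.range_succ, List.filter_append, List.filter_singleton, Bool.cond_eq_ite]

theorem mem_filtN {n : Nat} {goal : List Int} {nl : List Bool} {v : Int} {m : Nat}
    (h : m ∈ filtN n goal nl v) :
    m < n ∧ nl.getD m false = false ∧ goal.getD m 0 = v := by
  unfold filtN at h
  rcases List.mem_filter.mp h with ⟨hr, hc⟩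
  simp only [Bool.and_eq_true, Bool.not_eq_true', beq_iff_eq] at hc
  exact ⟨List.mem_range.mp hr, hc.1, hc.2⟩

theorem nodup_filtN (n : Nat) (goal : List Int) (nl : List Bool) (v : Int) : (filtN n goal nl v).Nodup :=
  (List.nodup_range).filter _

-- locking slot m removes m from its own queue and leaves every other queue unchanged
theorem getD_set_ne (nl : List Bool) (b : Bool) {m i : Nat} (h : i ≠ m) :
    (nl.set m b).getD i false = nl.getD i false := by
  simp only [List.getD, List.getElem?_set_ne (fun hh => h hh.symm)]

theorem filt_set_of_ne (n : Nat) (goal : List Int) (nl : List Bool) {die v : Int} {m : Nat}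
    (hg : goal.getD m 0 = die) (hv : v ≠ die) :
    filtN n goal (nl.set m true) v = filtN n goal nl v := by
  unfold filtN
  apply List.filter_congr
  intro i _
  by_cases him : i = m
  · subst him
    have h1 : (goal.getD i 0 == v) = false := beq_eq_false_iff_ne.mpr (hg ▸ Ne.symm hv)
    show (!(nl.set i true).getD i false && (goal.getD i 0 == v))
        = (!nl.getD i false && (goal.getD i 0 == v))
    rw [h1, Bool.and_false, Bool.and_false]
  · show (!(nl.set m true).getD i false && (goal.getD i 0 == v))
        = (!nl.getD i false && (goal.getD i 0 == v))
    rw [getD_set_ne nl true him]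

theorem filt_set_self (n : Nat) (goal : List Int) (nl : List Bool) {die : Int} {m : Nat} {t : List Nat}
    (hmlen : m < nl.length) (hft : filtN n goal nl die = m :: t) :
    filtN n goal (nl.set m true) die = t := by
  have hstep : filtN n goal (nl.set m true) die
      = (filtN n goal nl die).filter (fun i => decide (i ≠ m)) := by
    unfold filtN
    rw [List.filter_filter]
    apply List.filter_congr
    intro i _
    by_cases him : i = m
    · subst him
      have h1 : (nl.set i true).getD i false = true := by
        simp only [List.getD, List.getElem?_set_self hmlen, Option.getD_some]
      show (!(nl.set i true).getD i false && (goal.getD i 0 == die))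
          = (decide ¬i = i && (!nl.getD i false && (goal.getD i 0 == die)))
      rw [h1]
      simp
    · show (!(nl.set m true).getD i false && (goal.getD i 0 == die))
          = (decide ¬i = m && (!nl.getD i false && (goal.getD i 0 == die)))
      rw [getD_set_ne nl true him, decide_eq_true him, Bool.true_and]
  rw [hstep, hft]
  have hnd : (m :: t).Nodup := by rw [← hft]; exact nodup_filtN n goal nl die
  have hmt : m ∉ t := (List.nodup_cons.mp hnd).1
  rw [List.filter_cons]
  rw [if_neg (by simp)]
  apply List.filter_eq_self.mpr
  intro a ha
  simp only [decide_eq_true_eq]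
  exact fun h => hmt (h ▸ ha)

-- the lazy scan: preserves the queue invariant, never passes 8, and afterwards the head
-- of die's discovered queue region is the head of the full 8-slot region
theorem scanWhile_spec (goal : List Int) (nl : List Bool) (die : Int) :
    ∀ (k scanned : Nat) (slots : PySem.Dict Int (List Int)),
      8 - scanned ≤ k → scanned ≤ 8 →
      (∀ v, slots.getD v [] = (filtN scanned goal nl v).map (fun (i : Nat) => (i : Int))) →
      scanned ≤ (scanWhileB goal nl die slots scanned).2 ∧
      (scanWhileB goal nl die slots scanned).2 ≤ 8 ∧
      (∀ v, (scanWhileB goal nl die slots scanned).1.getD v []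
          = (filtN (scanWhileB goal nl die slots scanned).2 goal nl v).map (fun (i : Nat) => (i : Int))) ∧
      (filtN (scanWhileB goal nl die slots scanned).2 goal nl die).head?
        = (filtN 8 goal nl die).head? := by
  intro k
  induction k with
  | zero =>
      intro scanned slots hk h8 hinv
      have hs : scanned = 8 := by omega
      have hr : scanWhileB goal nl die slots scanned = (slots, scanned) := by
        rw [scanWhileB, dif_neg (by omega)]
      rw [hr]
      exact ⟨le_refl _, h8, hinv, by rw [hs]⟩
  | succ k ih =>
      intro scanned slots hk h8 hinv
      by_cases hc : (slots.getD die []).isEmpty = true ∧ scanned < 8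
      · have hr : scanWhileB goal nl die slots scanned
            = scanWhileB goal nl die
                (if !(nl.getD scanned false) then
                  slots.insert (goal.getD scanned 0) (slots.getD (goal.getD scanned 0) [] ++ [(scanned : Int)])
                else slots)
                (scanned + 1) := by
          rw [scanWhileB, dif_pos hc]
        have hinv' : ∀ v,
            (if !(nl.getD scanned false) then
              slots.insert (goal.getD scanned 0) (slots.getD (goal.getD scanned 0) [] ++ [(scanned : Int)])
            else slots).getD v []
              = (filtN (scanned + 1) goal nl v).map (fun (i : Nat) => (i : Int)) := by
          intro v
          rw [filtN_succ]
          by_cases hu : (!(nl.getD scanned false)) = true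
          · rw [if_pos hu]
            by_cases hv : goal.getD scanned 0 = v
            · have hcnd : (!(nl.getD scanned false) && (goal.getD scanned 0 == v)) = true := by
                rw [hu, hv]; simp
            
              rw [if_pos hcnd, List.map_append, hv, PySem.Dict.getD_insert_self, hinv v]
              rfl
            · have hcnd : (!(nl.getD scanned false) && (goal.getD scanned 0 == v)) = false := by
                rw [hu, Bool.true_and]; exact beq_eq_false_iff_ne.mpr hv
              rw [PySem.Dict.getD_insert_of_ne _ _ _ (fun h => hv h.symm), hinv v, hcnd,
                if_neg Bool.false_ne_true, List.append_nil]
          · have hu' : (!(nl.getD scanned false)) = false := by simpa using hu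
            have hcnd : (!(nl.getD scanned false) && (goal.getD scanned 0 == v)) = false := by
              rw [hu']; rfl
            rw [if_neg hu, hinv v, hcnd, if_neg Bool.false_ne_true, List.append_nil]
        have hres := ih (scanned + 1) _ (by omega) (by omega) hinv'
        rw [hr]
        exact ⟨le_trans (by omega) hres.1, hres.2.1, hres.2.2.1, hres.2.2.2⟩
      · have hr : scanWhileB goal nl die slots scanned = (slots, scanned) := by
          rw [scanWhileB, dif_neg hc]
        rw [hr]
        refine ⟨le_refl _, h8, hinv, ?_⟩
        rcases not_and_or.mp hc with hq | hs
        · have hne : slots.getD die [] ≠ [] := by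
            intro h0
            apply hq
            rw [h0]
            rfl
          have h2 : filtN scanned goal nl die ≠ [] := by
            intro h0
            apply hne
            rw [hinv die, h0]
            rfl
          obtain ⟨m, t, hmt⟩ := List.exists_cons_of_ne_nil h2
          rw [hmt, List.head?_cons, head_mono goal nl die h8 hmt]
        · have h8' : scanned = 8 := by omega
          rw [h8']

-- main invariant lemma: the two folds agree when the discovered queues list exactly the
-- unlocked slots below the scan pointer per value in increasing order, and either all 8
-- slots are in bounds or every remaining die still has a free in-bounds slot of its value
theorem main_fold (goal : List Int) (n : Nat) (hn8 : n ≤ 8) :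
    ∀ (dice : List Int) (nl : List Bool) (slots : PySem.Dict Int (List Int)) (scanned : Nat) (rem : List Int),
      n ≤ nl.length → scanned ≤ 8 →
      (n = 8 ∨ ∀ v, dice.count v ≤ (filtN n goal nl v).length) →
      (∀ v, slots.getD v [] = (filtN scanned goal nl v).map (fun (i : Nat) => (i : Int))) →
      dice.foldl (stepA goal) (nl, rem)
        = ((dice.foldl (stepB goal) (slots, scanned, nl, rem)).2.2.1,
           (dice.foldl (stepB goal) (slots, scanned, nl, rem)).2.2.2) := by
  intro dice
  induction dice with
  | nil => intro nl slots scanned rem _ _ _ _; rfl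
  | cons die rest ih =>
      intro nl slots scanned rem hlen hs8 hcase hinv
      simp only [List.foldl_cons]
      obtain ⟨hw1, hw2, hw3, hw4⟩ := scanWhile_spec goal nl die 8 scanned slots (by omega) hs8 hinv
      cases hft : filtN 8 goal nl die with
      | nil =>
          have hA : stepA goal (nl, rem) die = (nl, rem ++ [die]) := by
            have hsA : scanA nl goal die (List.range 8) = none := by
              rw [scanA_eq_head]
              have h0 : (List.range 8).filter (fun i => !(nl.getD i false) && (goal.getD i 0 == die)) = [] := hft
              rw [h0]; rfl
            simp [stepA, hsA]
          have hqnil : filtN (scanWhileB goal nl die slots scanned).2 goal nl die = [] := by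
            have := hw4
            rw [hft] at this
            exact List.head?_eq_none_iff.mp (by rw [this]; rfl)
          have hq : (scanWhileB goal nl die slots scanned).1.getD die [] = [] := by
            rw [hw3 die, hqnil]; rfl
          have hB : stepB goal (slots, scanned, nl, rem) die
              = ((scanWhileB goal nl die slots scanned).1, (scanWhileB goal nl die slots scanned).2, nl, rem ++ [die]) := by
            simp only [stepB, hq]
            rfl
          rw [hA, hB]
          apply ih nl _ _ (rem ++ [die]) hlen hw2 _ hw3
          rcases hcase with h8 | hcnt
          · exact Or.inl h8
          · refine Or.inr fun v => ?_
            have h1 := hcnt v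
            have h2 : rest.count v ≤ (die :: rest).count v := by
              rw [List.count_cons]; omega
            exact le_trans h2 h1
      | cons m t =>
          have hm := mem_filtN (n := 8) (goal := goal) (nl := nl) (v := die) (m := m)
            (by rw [hft]; exact List.mem_cons_self)
          -- m lies below n: either n = 8, or die still has an in-bounds slot and the
          -- global head is that in-bounds head
          have hmn : m < n := by
            rcases hcase with h8 | hcnt
            · omega
            · have h1 := hcnt die
              rw [List.count_cons_self] at h1
              have h2 : filtN n goal nl die ≠ [] := by
                intro h0
                rw [h0] at h1
                simp at h1
              obtain ⟨m', t', hmt'⟩ := List.exists_cons_of_ne_nil h2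
              have h3 : (filtN 8 goal nl die).head? = some m' := head_mono goal nl die hn8 hmt'
              rw [hft, List.head?_cons, Option.some_inj] at h3
              have hm' := mem_filtN (n := n) (goal := goal) (nl := nl) (v := die) (m := m')
                (by rw [hmt']; exact List.mem_cons_self)
              omega
          have hmlen : m < nl.length := lt_of_lt_of_le hmn hlen
          have hA : stepA goal (nl, rem) die = (nl.set m true, rem) := by
            have hsA : scanA nl goal die (List.range 8) = some m := by
              rw [scanA_eq_head]
              have h0 : (List.range 8).filter (fun i => !(nl.getD i false) && (goal.getD i 0 == die)) = m :: t := hft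
              rw [h0]; rfl
            simp [stepA, hsA]
          -- the discovered queue for die is nonempty with head m
          have hhead : (filtN (scanWhileB goal nl die slots scanned).2 goal nl die).head? = some m := by
            rw [hw4, hft]; rfl
          obtain ⟨t₂, ht₂⟩ : ∃ t₂, filtN (scanWhileB goal nl die slots scanned).2 goal nl die = m :: t₂ := by
            cases hx : filtN (scanWhileB goal nl die slots scanned).2 goal nl die with
            | nil => rw [hx] at hhead; simp at hhead
            | cons a b =>
                rw [hx, List.head?_cons, Option.some_inj] at hhead
                exact ⟨b, by rw [hhead]⟩
          have hq : (scanWhileB goal nl die slots scanned).1.getD die []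
              = (m : Int) :: t₂.map (fun (i : Nat) => (i : Int)) := by
            rw [hw3 die, ht₂, List.map_cons]
          have hB : stepB goal (slots, scanned, nl, rem) die
              = ((scanWhileB goal nl die slots scanned).1.insert die (t₂.map (fun (i : Nat) => (i : Int))),
                 (scanWhileB goal nl die slots scanned).2, nl.set m true, rem) := by
            simp only [stepB, hq, List.isEmpty_cons, List.tail_cons, List.headD_cons]
            rw [if_neg Bool.false_ne_true, Int.toNat_natCast]
          rw [hA, hB]
          apply ih
          · simpa using hlen
          · exact hw2
          · rcases hcase with h8 | hcnt
            · exact Or.inl h8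
            · refine Or.inr fun v => ?_
              by_cases hv : v = die
              · subst hv
                have h1 := hcnt v
                rw [List.count_cons_self] at h1
                have h2 : filtN n goal nl v ≠ [] := by
                  intro h0; rw [h0] at h1; simp at h1
                obtain ⟨m', t', hmt'⟩ := List.exists_cons_of_ne_nil h2
                have h3 : (filtN 8 goal nl v).head? = some m' := head_mono goal nl v hn8 hmt'
                rw [hft, List.head?_cons, Option.some_inj] at h3
                rw [← h3] at hmt'
                rw [filt_set_self n goal nl hmlen hmt']
                rw [hmt', List.length_cons] at h1
                omega
              · rw [filt_set_of_ne n goal nl hm.2.2 hv]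
                have h1 := hcnt v
                rw [List.count_cons] at h1
                have h2 : rest.count v ≤ rest.count v + (if die = v then 1 else 0) := Nat.le_add_right _ _
                calc rest.count v ≤ rest.count v + (if die = v then 1 else 0) := h2
                  _ ≤ (filtN n goal nl v).length := by simpa using h1
          · intro v
            by_cases hv : v = die
            · subst hv
              rw [PySem.Dict.getD_insert_self, filt_set_self _ goal nl hmlen ht₂]
            · rw [PySem.Dict.getD_insert_of_ne _ _ _ hv,
                filt_set_of_ne _ goal nl hm.2.2 hv, hw3 v]

-- ===== VERDICT (by name: the statement is the Claim_ definition above) =====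
theorem find_auto_locks_spec : Claim_equal_find_auto_locks := by
  intro pool_dice goal locked_mask _hdom hpre
  unfold Spec_find_auto_locks find_auto_locks find_auto_locks_alt
  have hinv0 : ∀ v, (PySem.Dict.empty : PySem.Dict Int (List Int)).getD v []
      = (filtN 0 goal locked_mask v).map (fun (i : Nat) => (i : Int)) := by
    intro v; rfl
  rcases hpre with ⟨hg, hm⟩ | hcnt
  · exact main_fold goal 8 (by omega) pool_dice locked_mask PySem.Dict.empty 0 [] (by omega)
      (by omega) (Or.inl rfl) hinv0
  · refine main_fold goal (min 8 (min goal.length locked_mask.length)) (by omega) pool_dice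
      locked_mask PySem.Dict.empty 0 [] (by omega) (by omega) (Or.inr fun v => ?_) hinv0
    by_cases hv : v ∈ pool_dice
    · exact hcnt v hv
    · rw [List.count_eq_zero.mpr hv]
      exact Nat.zero_le _
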